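-- pv_equiv track=rewrite | github.com/Stisat/PythonAdvance | main.py | check_h_v
-- ===== SOURCE A (Python) =====
-- def check_h_v(chess_desk: list):
--     """Checking for "1" value vertically and horizontally"""
--     temp_H_V = []
--     for column in range(len(chess_desk)):
--         for raw in range(len(chess_desk[0])):
--             if chess_desk[column].count(1) > 1:
--                 return False
--             temp_H_V.append(chess_desk[raw][column])
--         if temp_H_V.count(1) > 1:
--             return False
--         temp_H_V.clear()
--     return True
-- ===== SOURCE B (Python) =====
-- def check_h_v(chess_desk: list):
--     """Checking for "1" value vertically and horizontally"""
--     if any(row.count(1) > 1 for row in chess_desk):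
--         return False
--     return all(col.count(1) <= 1 for col in zip(*chess_desk))
-- ===== Notes on version B (the rewrite author's own statement) =====
-- stated objective: faster
-- what changed: Replaces A's triple-nested loop (which re-counts each row once per inner iteration and rebuilds each column element by element into a temp list) with two flat passes: one any() over the rows and one all() over the zip(*...) transpose, counting each line exactly once.
-- intended difference: On nonempty boards whose first row is empty but some row contains two or more 1s, A returns True (its per-row check sits inside the inner loop over range(len(chess_desk[0])), which never runs), while B returns False — a board with a doubled 1 in a row should fail the check. — e.g. on check_h_v([[], [1, 1]]): A returns true, B returns false
-- outside the precondition, e.g. on check_h_v([[1], [1, 1]]): A returns False, B returns False; on check_h_v([[1, 9], [1, 9], [9, 9], []]): A returns False, B returns True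
import Mathlib
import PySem

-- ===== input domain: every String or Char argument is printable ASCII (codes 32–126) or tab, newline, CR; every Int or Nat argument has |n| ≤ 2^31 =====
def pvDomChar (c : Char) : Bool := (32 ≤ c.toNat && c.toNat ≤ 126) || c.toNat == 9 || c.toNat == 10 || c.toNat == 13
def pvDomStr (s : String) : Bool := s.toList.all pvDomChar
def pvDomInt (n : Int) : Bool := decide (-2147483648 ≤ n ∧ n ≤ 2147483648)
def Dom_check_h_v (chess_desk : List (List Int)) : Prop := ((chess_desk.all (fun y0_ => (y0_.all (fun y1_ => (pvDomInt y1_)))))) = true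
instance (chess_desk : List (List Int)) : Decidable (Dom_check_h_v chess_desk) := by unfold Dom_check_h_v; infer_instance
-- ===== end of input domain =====

-- B replaces A's triple-nested loop by two flat counting passes (rows, then the zip(*) transpose).

-- ===== PORT A =====
-- inner 'for raw in range(len(chess_desk[0]))' loop; none = the early 'return False', some temp = normal exit
def chvInner (cd : List (List Int)) (column : Int) (raws : List Int) (temp : List Int) : Option (List Int) :=
  match raws with
  | [] => some temp
  | raw :: rest =>
    if PySem.List.count (PySem.List.pyGetD cd column []) 1 > 1 then none
    else chvInner cd column rest (temp ++ [PySem.List.pyGetD (PySem.List.pyGetD cd raw []) column 0])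

-- outer 'for column in range(len(chess_desk))' loop ('temp_H_V.clear()' = recursing with a fresh [])
def chvOuter (cd : List (List Int)) (columns : List Int) : Bool :=
  match columns with
  | [] => true
  | column :: rest =>
    match chvInner cd column (PySem.List.pyRange 0 ((PySem.List.pyGetD cd 0 []).length : Int) 1) [] with
    | none => false
    | some temp => if PySem.List.count temp 1 > 1 then false else chvOuter cd rest

def check_h_v (chess_desk : List (List Int)) : Bool :=
  chvOuter chess_desk (PySem.List.pyRange 0 (chess_desk.length : Int) 1)

-- ===== PORT B =====
-- zip(*l): truncating transpose, exact — fuel = first-row length suffices since zip stops at the shortest row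
def zipStarAux (fuel : Nat) (l : List (List Int)) : List (List Int) :=
  match fuel with
  | 0 => []
  | f + 1 =>
    if l.any (fun r => r.isEmpty) then []
    else (l.map (fun r => r.headD 0)) :: zipStarAux f (l.map (fun r => r.tail))

def zipStar (l : List (List Int)) : List (List Int) :=
  match l with
  | [] => []
  | r :: _ => zipStarAux r.length l

def check_h_v_alt (chess_desk : List (List Int)) : Bool :=
  if chess_desk.any (fun row => PySem.List.count row 1 > 1) then false
  else (zipStar chess_desk).all (fun col => PySem.List.count col 1 ≤ 1)

-- ===== PRECONDITION & SPEC =====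
-- Pre_ admits the boards on which A completes without an IndexError and the claim below makes sense:
-- the empty board; boards whose first row spans the board height and whose rows all reach it (A's
-- effective square domain — entries beyond the height are only seen by the row counts, in both A and B);
-- boards with an empty first row; and boards whose first row already holds two 1s (decided immediately).
-- Other ragged boards are excluded: there A raises IndexError for most shapes, and where it does return,
-- its value reflects the truncated prefix of the board it happened to scan before the bad index.
def Pre_check_h_v (chess_desk : List (List Int)) : Prop :=
  ((chess_desk.getD 0 []).length = chess_desk.length ∧ ∀ row ∈ chess_desk, chess_desk.length ≤ row.length)
    ∨ chess_desk.getD 0 [] = []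
    ∨ 2 ≤ List.count 1 (chess_desk.getD 0 [])
instance (chess_desk : List (List Int)) : Decidable (Pre_check_h_v chess_desk) := by unfold Pre_check_h_v; infer_instance
def pvWitness_check_h_v : List (List Int) := [[1, 0], [0, 1]]
-- On nonempty boards whose first row is empty but some row contains two or more 1s, A returns True (its
-- per-row check sits inside the inner loop over range(len(chess_desk[0])), which never runs), while B
-- returns False — a board with a doubled 1 in a row should fail the check.
def D_check_h_v (chess_desk : List (List Int)) : Prop :=
  chess_desk ≠ [] ∧ chess_desk.getD 0 [] = [] ∧ ∃ row ∈ chess_desk, 2 ≤ List.count 1 row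
instance (chess_desk : List (List Int)) : Decidable (D_check_h_v chess_desk) := by unfold D_check_h_v; infer_instance
def Spec_check_h_v (chess_desk : List (List Int)) (out : Bool) : Prop := ¬ D_check_h_v chess_desk → out = check_h_v_alt chess_desk
instance (chess_desk : List (List Int)) (out : Bool) : Decidable (Spec_check_h_v chess_desk out) := by unfold Spec_check_h_v; infer_instance
def pvDiffWitness_check_h_v : List (List Int) := [[], [1, 1]]
def pvDiffWitnessOut_check_h_v : Bool × Bool := (true, false)

-- ===== CLAIM (what is proved, stated in full; the proofs are below) =====
def Claim_unchanged_check_h_v : Prop := ∀ (chess_desk : List (List Int)), Dom_check_h_v chess_desk → Pre_check_h_v chess_desk → Spec_check_h_v chess_desk (check_h_v chess_desk)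
def Claim_changed_check_h_v : Prop := Dom_check_h_v (pvDiffWitness_check_h_v) ∧ Pre_check_h_v (pvDiffWitness_check_h_v) ∧ D_check_h_v (pvDiffWitness_check_h_v) ∧ check_h_v (pvDiffWitness_check_h_v) = pvDiffWitnessOut_check_h_v.1 ∧ check_h_v_alt (pvDiffWitness_check_h_v) = pvDiffWitnessOut_check_h_v.2 ∧ pvDiffWitnessOut_check_h_v.1 ≠ pvDiffWitnessOut_check_h_v.2
def Claim_exact_check_h_v : Prop := ∀ (chess_desk : List (List Int)), Dom_check_h_v chess_desk → Pre_check_h_v chess_desk → D_check_h_v chess_desk → check_h_v chess_desk ≠ check_h_v_alt chess_desk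

-- ===== LEMMAS AND PROOFS =====

-- A's column list for column c (what temp_H_V holds at the end of the inner loop)
def colL (cd : List (List Int)) (c : Int) : List Int :=
  (PySem.List.pyRange 0 ((PySem.List.pyGetD cd 0 []).length : Int) 1).map
    (fun r => PySem.List.pyGetD (PySem.List.pyGetD cd r []) c 0)

theorem chvInner_bad (cd : List (List Int)) (c : Int) (raws temp : List Int)
    (h : PySem.List.count (PySem.List.pyGetD cd c []) 1 > 1) (hne : raws ≠ []) :
    chvInner cd c raws temp = none := by
  cases raws with
  | nil => exact absurd rfl hne
  | cons raw rest =>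
    have h' : ¬ List.count 1 (PySem.List.pyGetD cd c []) ≤ 1 := by
      simp [PySem.List.count_eq] at h; omega
    simp [chvInner, h']

theorem chvInner_good (cd : List (List Int)) (c : Int) (raws temp : List Int)
    (h : ¬ PySem.List.count (PySem.List.pyGetD cd c []) 1 > 1) :
    chvInner cd c raws temp
      = some (temp ++ raws.map (fun r => PySem.List.pyGetD (PySem.List.pyGetD cd r []) c 0)) := by
  induction raws generalizing temp with
  | nil => simp [chvInner]
  | cons raw rest ih =>
    have h' : List.count 1 (PySem.List.pyGetD cd c []) ≤ 1 := by
      simp [PySem.List.count_eq] at h; omega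
    simp [chvInner, h', ih]

-- with an empty first row the inner loop never runs, so A checks nothing at all
theorem chvOuter_empty_first (cd : List (List Int)) (columns : List Int)
    (hm0 : (PySem.List.pyGetD cd 0 []).length = 0) :
    chvOuter cd columns = true := by
  induction columns with
  | nil => simp [chvOuter]
  | cons c rest ih =>
    rw [chvOuter, hm0]
    have hr : PySem.List.pyRange 0 ((0 : Nat) : Int) 1 = [] :=
      PySem.List.pyRange_one_eq_nil (by simp)
    rw [hr]
    simpa [chvInner] using ih

theorem chvOuter_eq_all (cd : List (List Int)) (columns : List Int)
    (hm : 0 < (PySem.List.pyGetD cd 0 []).length) :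
    chvOuter cd columns
      = columns.all (fun c =>
          decide (PySem.List.count (PySem.List.pyGetD cd c []) 1 ≤ 1)
            && decide (PySem.List.count (colL cd c) 1 ≤ 1)) := by
  have hne : PySem.List.pyRange 0 ((PySem.List.pyGetD cd 0 []).length : Int) 1 ≠ [] := by
    intro hnil
    have := PySem.List.length_pyRange_one 0 ((PySem.List.pyGetD cd 0 []).length : Int)
    rw [hnil] at this
    simp at this
    omega
  induction columns with
  | nil => simp [chvOuter]
  | cons c rest ih =>
    by_cases hrow : PySem.List.count (PySem.List.pyGetD cd c []) 1 > 1
    · rw [chvOuter, chvInner_bad cd c _ [] hrow hne]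
      have h1 : ¬ List.count 1 (PySem.List.pyGetD cd c []) ≤ 1 := by
        simp [PySem.List.count_eq] at hrow; omega
      simp [h1]
    · rw [chvOuter, chvInner_good cd c _ [] hrow]
      simp only [List.nil_append]
      have hrow' : List.count 1 (PySem.List.pyGetD cd c []) ≤ 1 := by
        simp [PySem.List.count_eq] at hrow; omega
      by_cases hcol : PySem.List.count (colL cd c) 1 > 1
      · have hcol' : 1 < List.count 1 (colL cd c) := by
          simpa [PySem.List.count_eq] using hcol
        have h2 : ¬ List.count 1 (colL cd c) ≤ 1 := by omega
        simp only [colL] at hcol' h2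
        simp [colL, hcol', h2]
      · have hcol' : ¬ 1 < List.count 1 (colL cd c) := by
          simpa [PySem.List.count_eq] using hcol
        have h2 : List.count 1 (colL cd c) ≤ 1 := by omega
        simp only [colL] at hcol' h2
        simp [colL, hcol', h2, hrow', ih]

theorem headD_eq_getD_zero (r : List Int) : r.headD 0 = r.getD 0 0 := by
  cases r <;> rfl

theorem tail_getD (r : List Int) (c : Nat) : r.tail.getD c 0 = r.getD (c + 1) 0 := by
  cases r <;> rfl

-- indexing loop over range(len(l)) is a map over l
theorem map_getD_range {α β : Type} (l : List α) (d : α) (f : α → β) :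
    (List.range l.length).map (fun k => f (l.getD k d)) = l.map f := by
  induction l with
  | nil => simp
  | cons x t ih =>
    rw [List.length_cons, List.range_succ_eq_map, List.map_cons, List.map_map]
    simp only [List.getD_cons_zero, List.map_cons, List.cons.injEq]
    refine ⟨trivial, ?_⟩
    rw [← ih]
    exact List.map_congr_left (fun k _ => rfl)

theorem zipStarAux_eq (k : Nat) :
    ∀ (l : List (List Int)), l ≠ [] → (∀ r ∈ l, k ≤ r.length) →
      zipStarAux k l = (List.range k).map (fun c => l.map (fun row => row.getD c 0)) := by
  induction k with
  | zero => intro l _ _; simp [zipStarAux]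
  | succ k ih =>
    intro l hne hlen
    have hnoempty : l.any (fun r => r.isEmpty) = false := by
      simp only [List.any_eq_false]
      intro r hr
      have hlr := hlen r hr
      cases r with
      | nil => simp at hlr
      | cons a t => simp
    rw [zipStarAux, hnoempty]
    simp only [Bool.false_eq_true, if_false]
    have htne : l.map (fun r => r.tail) ≠ [] := by
      cases l <;> simp_all
    have htail : ∀ r ∈ l.map (fun r => r.tail), k ≤ r.length := by
      intro r hr
      obtain ⟨r', hr', rfl⟩ := List.mem_map.mp hr
      have := hlen r' hr'
      simp [List.length_tail]
      omega
    rw [ih _ htne htail, List.range_succ_eq_map, List.map_cons, List.map_map]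
    simp only [List.cons.injEq]
    refine ⟨List.map_congr_left (fun r _ => headD_eq_getD_zero r), ?_⟩
    apply List.map_congr_left
    intro c _
    simp only [Function.comp_apply, List.map_map]
    exact List.map_congr_left (fun r _ => tail_getD r c)

-- the square-shaped case: both programs check every row and all n columns
theorem check_eq_of_shape (cd : List (List Int)) (hne : cd ≠ [])
    (hfirst : (cd.getD 0 []).length = cd.length)
    (hge : ∀ row ∈ cd, cd.length ≤ row.length) :
    check_h_v cd = check_h_v_alt cd := by
  have hn0 : 0 < cd.length := by cases cd <;> simp_all
  have hheadlen : (PySem.List.pyGetD cd 0 []).length = cd.length := by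
    rw [PySem.List.pyGetD_zero]; exact hfirst
  rw [check_h_v, chvOuter_eq_all cd _ (by omega), PySem.List.pyRange_zero_nat cd.length, List.all_map]
  have hget : ∀ c : Nat, PySem.List.pyGetD cd (c : Int) [] = cd.getD c [] := by
    intro c; simp
  have hcolL : ∀ c : Nat, colL cd (c : Int) = cd.map (fun row => row.getD c 0) := by
    intro c
    unfold colL
    rw [hheadlen, PySem.List.pyRange_zero_nat cd.length, List.map_map]
    refine Eq.trans (List.map_congr_left ?_) (map_getD_range cd [] (fun row => row.getD c 0))
    intro r _
    simp [Function.comp]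
  have hzip : zipStar cd = (List.range cd.length).map (fun c => cd.map (fun row => row.getD c 0)) := by
    cases cd with
    | nil => exact absurd rfl hne
    | cons r t =>
      have hr : r.length = (r :: t).length := by simpa using hfirst
      rw [zipStar, hr]
      exact zipStarAux_eq _ _ (by simp) (fun row hrow => le_of_eq_of_le rfl (hge row hrow))
  rw [check_h_v_alt, hzip, List.all_map]
  by_cases hany : cd.any (fun row => PySem.List.count row 1 > 1) = true
  · rw [if_pos hany]
    obtain ⟨row, hrow, hbad⟩ := List.any_eq_true.mp hany
    obtain ⟨i, hi, rfl⟩ := List.mem_iff_getElem.mp hrow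
    rw [List.all_eq_false]
    refine ⟨i, List.mem_range.mpr hi, ?_⟩
    have hgd : cd.getD i [] = cd[i] := List.getD_eq_getElem cd [] hi
    simp only [Function.comp_apply, hget, hcolL, hgd]
    simp [PySem.List.count_eq] at hbad ⊢
    omega
  · rw [if_neg hany]
    have hanyf : cd.any (fun row => PySem.List.count row 1 > 1) = false :=
      Bool.eq_false_iff.mpr hany
    have hok : ∀ c, c < cd.length → List.count 1 (cd.getD c []) ≤ 1 := by
      intro c hc
      rw [List.getD_eq_getElem cd [] hc]
      have := List.any_eq_false.mp hanyf cd[c] (List.getElem_mem hc)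
      simp [PySem.List.count_eq] at this
      omega
    rw [Bool.eq_iff_iff, List.all_eq_true, List.all_eq_true]
    constructor
    · intro h c hc
      have h1 := h c hc
      simp only [Function.comp_apply, hget, hcolL] at h1 ⊢
      simp [PySem.List.count_eq] at h1 ⊢
      exact h1.2
    · intro h c hc
      have h1 := h c hc
      have h2 := hok c (List.mem_range.mp hc)
      simp only [Function.comp_apply, hget, hcolL] at h1 ⊢
      simp [PySem.List.count_eq] at h1 ⊢
      exact ⟨h2, h1⟩

-- A rejects as soon as the first row holds two 1s; so does B's row pass
theorem check_eq_of_bad_first (cd : List (List Int))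
    (hbad : 2 ≤ List.count 1 (cd.getD 0 [])) :
    check_h_v cd = check_h_v_alt cd := by
  cases cd with
  | nil => simp at hbad
  | cons r t =>
    have hr : (r :: t).getD 0 [] = r := rfl
    rw [hr] at hbad
    have hcnt : PySem.List.count (PySem.List.pyGetD (r :: t) 0 []) 1 > 1 := by
      simp [PySem.List.pyGetD_zero, PySem.List.count_eq]
      omega
    have hm : 0 < r.length := by
      have := List.count_le_length (l := r) (a := 1)
      omega
    have hlen : 0 < ((PySem.List.pyGetD (r :: t) 0 []).length : Int) := by
      simp [PySem.List.pyGetD_zero]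
      omega
    have hrange : PySem.List.pyRange 0 ((r :: t).length : Int) 1
        = 0 :: PySem.List.pyRange 1 ((r :: t).length : Int) 1 := by
      simpa using PySem.List.pyRange_one_cons (a := 0) (b := ((r :: t).length : Int)) (by simp)
    have hrne : PySem.List.pyRange 0 ((PySem.List.pyGetD (r :: t) 0 []).length : Int) 1 ≠ [] := by
      intro hnil
      have := PySem.List.length_pyRange_one 0 ((PySem.List.pyGetD (r :: t) 0 []).length : Int)
      rw [hnil] at this
      simp at this
      omega
    rw [check_h_v, hrange, chvOuter, chvInner_bad _ 0 _ [] hcnt hrne]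
    have hany : (r :: t).any (fun row => PySem.List.count row 1 > 1) = true := by
      refine List.any_eq_true.mpr ⟨r, by simp, ?_⟩
      simp [PySem.List.count_eq]
      omega
    rw [check_h_v_alt, if_pos hany]

-- ===== VERDICT (by name: the statement is the Claim_ definition above) =====
theorem check_h_v_spec : Claim_unchanged_check_h_v := by
  intro cd _ hpre hnd
  by_cases hcd : cd = []
  · subst hcd; rfl
  · rcases hpre with ⟨hfirst, hge⟩ | h0 | hbad
    · exact check_eq_of_shape cd hcd hfirst hge
    · -- empty first row, and (¬ D_) no row holds two 1s: both sides accept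
      have hm0 : (PySem.List.pyGetD cd 0 []).length = 0 := by
        rw [PySem.List.pyGetD_zero, h0]; rfl
      rw [check_h_v, chvOuter_empty_first cd _ hm0]
      have hnobad : ∀ row ∈ cd, ¬ 2 ≤ List.count 1 row := by
        intro row hrow hc
        exact hnd ⟨hcd, h0, row, hrow, hc⟩
      have hanyf : cd.any (fun row => PySem.List.count row 1 > 1) = false := by
        rw [List.any_eq_false]
        intro row hrow
        have := hnobad row hrow
        simp [PySem.List.count_eq]
        omega
      have hzs : zipStar cd = [] := by
        cases cd with
        | nil => rfl
        | cons r t =>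
          have : r = [] := by simpa using h0
          subst this
          rfl
      rw [check_h_v_alt, if_neg (Bool.eq_false_iff.mp hanyf), hzs]
      rfl
    · exact (check_eq_of_bad_first cd hbad).symm ▸ rfl

theorem check_h_v_changed : Claim_changed_check_h_v := by
  unfold Claim_changed_check_h_v; decide

theorem check_h_v_tight : Claim_exact_check_h_v := by
  intro cd _ _ hd
  obtain ⟨hne, h0, row, hrow, hcnt⟩ := hd
  have hm0 : (PySem.List.pyGetD cd 0 []).length = 0 := by
    rw [PySem.List.pyGetD_zero, h0]; rfl
  rw [check_h_v, chvOuter_empty_first cd _ hm0]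
  have hany : cd.any (fun r => PySem.List.count r 1 > 1) = true := by
    refine List.any_eq_true.mpr ⟨row, hrow, ?_⟩
    simp [PySem.List.count_eq]
    omega
  rw [check_h_v_alt, if_pos hany]
  simp
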